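-- pv_equiv track=rewrite | github.com/woo00oo/codingtest_study | 프로그래머스/[1차]비밀지도.py | solution
-- ===== SOURCE A (Python) =====
-- def solution(n, arr1, arr2):
--     answer = [[-1] * n for _ in range(n)]
--
--     # 10진수 -> 2진수로 변환
--     for i in range(n):
--         arr1[i] = format(arr1[i], 'b').zfill(n)
--         arr2[i] = format(arr2[i], 'b').zfill(n)
--
--     # 2개의 배열 합치기(or 연산)
--     for i in range(n):
--         for j in range(len(answer[i])):
--             if int(arr1[i][j]) or int(arr2[i][j]):
--                 answer[i][j] = '#'
--             else:
--                 answer[i][j] = ' '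
--
--     ans = []
--     for i in range(n):
--         ans.append(''.join(answer[i]))
--
--     return ans
-- ===== SOURCE B (Python) =====
-- def solution(n, arr1, arr2):
--     return [
--         format(arr1[i] | arr2[i], 'b').zfill(n).replace('1', '#').replace('0', ' ')
--         for i in range(n)
--     ]
-- ===== Notes on version B (the rewrite author's own statement) =====
-- stated objective: idiomatic
-- what changed: B replaces A's per-cell nested loops (decimal-to-binary string conversion of both arrays in place, then int(char)-truthiness OR on every cell of a pre-allocated n*n matrix, then a join pass) with one integer bitwise OR per row followed by a single format/zfill/replace of the merged integer.
-- outside the precondition, e.g. on solution(1, [2], [0]): A returns ['#'], B returns ['# ']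
import Mathlib
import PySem

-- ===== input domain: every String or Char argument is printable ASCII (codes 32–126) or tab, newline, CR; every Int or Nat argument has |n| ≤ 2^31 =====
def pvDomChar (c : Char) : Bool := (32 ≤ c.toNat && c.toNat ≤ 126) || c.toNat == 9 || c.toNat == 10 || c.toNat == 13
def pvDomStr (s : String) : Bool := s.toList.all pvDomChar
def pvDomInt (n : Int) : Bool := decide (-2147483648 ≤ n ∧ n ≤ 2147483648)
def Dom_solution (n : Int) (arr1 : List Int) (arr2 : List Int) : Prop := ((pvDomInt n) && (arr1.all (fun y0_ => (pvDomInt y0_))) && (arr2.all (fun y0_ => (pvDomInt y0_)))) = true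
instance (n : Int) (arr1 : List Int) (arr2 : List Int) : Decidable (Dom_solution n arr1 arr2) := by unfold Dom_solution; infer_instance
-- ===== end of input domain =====

-- B computes each row by one integer OR plus format/zfill/replace instead of A's per-cell
-- nested loops. Equivalence is about the RETURN value only: Python A overwrites arr1/arr2
-- in place with binary strings, B does not mutate its arguments.

-- ===== PORT A =====
-- answer's cells are -1 (int) then '#'/' ' (str) in Python; typed here as String with "-1"
-- as the initial placeholder (it is always overwritten before being read).
-- The in-place assignments arr1[i] = format(arr1[i],'b').zfill(n) (i in range(n)) are typed
-- as the parallel string lists b1/b2, built by the same loop; only those n entries are read later.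
def solution (n : Int) (arr1 : List Int) (arr2 : List Int) : List String :=
  let answer : List (List String) :=
    (PySem.List.pyRange 0 n 1).map (fun _ => PySem.List.pyRepeat ["-1"] n)
  let b1 : List (List Char) :=
    (PySem.List.pyRange 0 n 1).foldl (fun acc i =>
      acc ++ [PySem.Chars.zfill (PySem.Int.toBinChars (PySem.List.pyGetD arr1 i 0)) n]) []
  let b2 : List (List Char) :=
    (PySem.List.pyRange 0 n 1).foldl (fun acc i =>
      acc ++ [PySem.Chars.zfill (PySem.Int.toBinChars (PySem.List.pyGetD arr2 i 0)) n]) []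
  let answer2 : List (List String) :=
    (PySem.List.pyRange 0 n 1).map (fun i =>
      (PySem.List.pyRange 0 (PySem.List.len (PySem.List.pyGetD answer i [])) 1).foldl
        (fun row j =>
          if (PySem.Int.ofChars? [PySem.List.pyGetD (PySem.List.pyGetD b1 i []) j '0']).getD 0 ≠ 0 ∨
             (PySem.Int.ofChars? [PySem.List.pyGetD (PySem.List.pyGetD b2 i []) j '0']).getD 0 ≠ 0
          then PySem.List.pySetD row j "#"
          else PySem.List.pySetD row j " ")
        (PySem.List.pyGetD answer i []))
  (PySem.List.pyRange 0 n 1).foldl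
    (fun acc i => acc ++ [PySem.Str.join "" (PySem.List.pyGetD answer2 i [])]) []

-- ===== PORT B =====
def solution_alt (n : Int) (arr1 : List Int) (arr2 : List Int) : List String :=
  (PySem.List.pyRange 0 n 1).map (fun i =>
    PySem.Str.replace
      (PySem.Str.replace
        (PySem.Str.zfill
          (PySem.Int.toBin (PySem.Int.bor (PySem.List.pyGetD arr1 i 0) (PySem.List.pyGetD arr2 i 0))) n)
        "1" "#")
      "0" " ")

-- ===== PRECONDITION & SPEC =====
-- Pre_ excludes: n > len(arr1) or n > len(arr2) (A raises IndexError) and negative entries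
-- among the first n (A raises ValueError at int('-')); it also excludes entries ≥ 2^n, on
-- which A still returns a value but the binary string overflows the n-column map and A's
-- row (the first n characters of the two over-long, possibly differently-long strings,
-- OR-ed positionally) is as accidental as B's over-long row — neither is the n×n map the
-- function is for.
def Pre_solution (n : Int) (arr1 : List Int) (arr2 : List Int) : Prop :=
  n ≤ (arr1.length : Int) ∧ n ≤ (arr2.length : Int) ∧
  ∀ k : Nat, k < n.toNat →
    0 ≤ arr1.getD k 0 ∧ arr1.getD k 0 < 2 ^ n.toNat ∧
    0 ≤ arr2.getD k 0 ∧ arr2.getD k 0 < 2 ^ n.toNat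
instance (n : Int) (arr1 : List Int) (arr2 : List Int) : Decidable (Pre_solution n arr1 arr2) := by
  unfold Pre_solution; infer_instance

def pvWitness_solution : Int × List Int × List Int := (2, [1, 2], [2, 1])

def Spec_solution (n : Int) (arr1 : List Int) (arr2 : List Int) (out : List String) : Prop := out = solution_alt n arr1 arr2
instance (n : Int) (arr1 : List Int) (arr2 : List Int) (out : List String) : Decidable (Spec_solution n arr1 arr2 out) := by unfold Spec_solution; infer_instance

-- ===== CLAIM (what is proved, stated in full; the proofs are below) =====
def Claim_equal_solution : Prop := ∀ (n : Int) (arr1 : List Int) (arr2 : List Int), Dom_solution n arr1 arr2 → Pre_solution n arr1 arr2 → Spec_solution n arr1 arr2 (solution n arr1 arr2)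

-- ===== LEMMAS AND PROOFS =====

-- the n-bit, MSB-first binary rendering of x
def pvBinFull (N x : Nat) : List Char :=
  (List.range N).map (fun j => if x.testBit (N - 1 - j) then '1' else '0')

-- MSB-first digit recursion (what Nat.toDigits 2 computes)
def pvNatBin (x : Nat) : List Char :=
  if _h : x < 2 then [Nat.digitChar x]
  else pvNatBin (x / 2) ++ [Nat.digitChar (x % 2)]
decreasing_by exact Nat.div_lt_self (by omega) (by omega)

lemma pvNatBin_lt (x : Nat) (h : x < 2) : pvNatBin x = [Nat.digitChar x] := by
  rw [pvNatBin, dif_pos h]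

lemma pvNatBin_ge (x : Nat) (h : ¬ x < 2) :
    pvNatBin x = pvNatBin (x / 2) ++ [Nat.digitChar (x % 2)] := by
  rw [pvNatBin, dif_neg h]

lemma pvNatBin_mem (x : Nat) : ∀ c ∈ pvNatBin x, c = '0' ∨ c = '1' := by
  induction x using Nat.strong_induction_on with
  | _ x ih =>
    by_cases h2 : x < 2
    · rw [pvNatBin_lt x h2]
      intro c hc
      interval_cases x <;> simp_all [Nat.digitChar]
    · rw [pvNatBin_ge x h2]
      intro c hc
      rw [List.mem_append, List.mem_singleton] at hc
      rcases hc with hc | hc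
      · exact ih (x/2) (Nat.div_lt_self (by omega) (by omega)) c hc
      · have : x % 2 = 0 ∨ x % 2 = 1 := by omega
        rcases this with h | h <;> simp [hc, h, Nat.digitChar]

lemma pvNatBin_ne_nil (x : Nat) : pvNatBin x ≠ [] := by
  rw [pvNatBin]; split <;> simp

lemma pvToDigitsCore_eq (fuel : Nat) : ∀ x acc, x < 2 ^ fuel → 1 ≤ fuel →
    Nat.toDigitsCore 2 fuel x acc = pvNatBin x ++ acc := by
  induction fuel with
  | zero => intro x acc _ h; omega
  | succ f ih =>
    intro x acc hx _
    rw [Nat.toDigitsCore]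
    by_cases h2 : x < 2
    · have hd : x / 2 = 0 := by omega
      simp only [hd, reduceIte]
      rw [pvNatBin_lt x h2]
      have : x % 2 = x := by omega
      simp [this]
    · have hne : x / 2 ≠ 0 := by omega
      simp only [hne, reduceIte]
      rw [ih (x / 2) _ (by
        have : 2 ^ (f+1) = 2 ^ f * 2 := by ring
        omega) (by
        by_contra h
        have : f = 0 := by omega
        subst this
        norm_num at hx
        omega)]
      rw [pvNatBin_ge x h2]
      simp

lemma pvToDigits_eq (x : Nat) : Nat.toDigits 2 x = pvNatBin x := by
  have := pvToDigitsCore_eq (x + 1) x [] (by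
    calc x < 2 ^ x := Nat.lt_two_pow_self
    _ ≤ 2 ^ (x+1) := Nat.pow_le_pow_right (by omega) (by omega)) (by omega)
  simpa [Nat.toDigits] using this

lemma pvBinFull_succ (N x : Nat) :
    pvBinFull (N + 1) x = pvBinFull N (x / 2) ++ [if x % 2 = 1 then '1' else '0'] := by
  unfold pvBinFull
  rw [List.range_succ, List.map_append]
  congr 1
  · apply List.map_congr_left
    intro j hj
    rw [List.mem_range] at hj
    have h1 : N + 1 - 1 - j = (N - 1 - j) + 1 := by omega
    rw [h1, Nat.testBit_add_one]
  · simp [Nat.testBit_zero]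

lemma pvBinFull_zero_val (N : Nat) : pvBinFull N 0 = List.replicate N '0' := by
  simp [pvBinFull, Nat.zero_testBit, List.map_const']

lemma pvRepl_natBin (N x : Nat) (hx : x < 2 ^ N) (hN : 1 ≤ N) :
    List.replicate (N - (pvNatBin x).length) '0' ++ pvNatBin x = pvBinFull N x := by
  induction N generalizing x with
  | zero => omega
  | succ N ih =>
    rw [pvBinFull_succ]
    by_cases h2 : x < 2
    · rw [pvNatBin_lt x h2]
      have hd : x / 2 = 0 := by omega
      have hm : x % 2 = x := by omega
      rw [hd, pvBinFull_zero_val, hm]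
      have hch : Nat.digitChar x = if x = 1 then '1' else '0' := by
        interval_cases x <;> simp [Nat.digitChar]
      simp [hch]
    · have hN1 : 1 ≤ N := by
        by_contra h
        have hN0 : N = 0 := by omega
        subst hN0
        norm_num at hx
        omega
      rw [pvNatBin_ge x h2]
      have hlen : (pvNatBin (x/2) ++ [Nat.digitChar (x % 2)]).length
          = (pvNatBin (x/2)).length + 1 := by simp
      rw [hlen]
      have harr : N + 1 - ((pvNatBin (x/2)).length + 1) = N - (pvNatBin (x/2)).length := by omega
      rw [harr, ← List.append_assoc]
      rw [ih (x/2) (by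
        have : 2 ^ (N+1) = 2 ^ N * 2 := by ring
        omega) hN1]
      congr 1
      have : x % 2 = 0 ∨ x % 2 = 1 := by omega
      rcases this with h | h <;> simp [h, Nat.digitChar]

lemma pvZfill_natBin (N x : Nat) (hx : x < 2 ^ N) (hN : 1 ≤ N) :
    PySem.Chars.zfill (pvNatBin x) (N : Int) = pvBinFull N x := by
  unfold PySem.Chars.zfill
  by_cases hle : (N : Int) ≤ ((pvNatBin x).length : Int)
  · rw [if_pos hle]
    have h0 := pvRepl_natBin N x hx hN
    have hz : N - (pvNatBin x).length = 0 := by omega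
    rw [hz] at h0
    simpa using h0
  · rw [if_neg hle]
    rcases hcs : pvNatBin x with _ | ⟨c, rest⟩
    · exact absurd hcs (pvNatBin_ne_nil x)
    · have hc : c = '0' ∨ c = '1' := by
        apply pvNatBin_mem x
        rw [hcs]; simp
      have hsign : ¬ (c = '+' ∨ c = '-') := by rcases hc with h | h <;> simp [h]
      have h0 := pvRepl_natBin N x hx hN
      rw [hcs] at h0
      have hT : (N : Int).toNat = N := by omega
      split
      · rename_i c1 rest1 heq
        injection heq with h1 h2
        subst h1; subst h2
        rw [if_neg hsign, hT]
        simpa using h0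
      · rename_i heq
        exact absurd heq (by simp)

lemma pvToBinChars_natCast (m : Nat) :
    PySem.Int.toBinChars ((m : Nat) : Int) = pvNatBin m := by
  unfold PySem.Int.toBinChars
  rw [if_neg (by omega)]
  rw [show ((m : Nat) : Int).toNat = m from by omega]
  exact pvToDigits_eq m

-- setting every index of a long-enough list = map over the range
lemma pvFoldlSetRange {α : Type} (g : Nat → α) (l : List α) :
    ∀ k, k ≤ l.length →
      (List.range k).foldl (fun r j => r.set j (g j)) l = (List.range k).map g ++ l.drop k := by
  intro k
  induction k with
  | zero => simp
  | succ k ih =>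
    intro hk
    rw [List.range_succ, List.foldl_append, List.map_append]
    rw [ih (by omega)]
    have hlen : ((List.range k).map g).length = k := by simp
    have hset : ((List.range k).map g ++ l.drop k).set k (g k)
        = (List.range k).map g ++ (l.drop k).set 0 (g k) := by
      rw [List.set_append]
      simp [hlen]
    simp only [List.foldl_cons, List.foldl_nil]
    rw [hset]
    have hdk : l.drop k = l[k] :: l.drop (k+1) := List.drop_eq_getElem_cons (by omega)
    rw [hdk, List.set_cons_zero]
    simp

lemma pvReplaceGo_single (c d : Char) :
    ∀ (l : List Char) (fuel : Nat) (acc : List Char), l.length ≤ fuel →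
      PySem.Chars.replace.go [c] [d] fuel l acc
        = acc.reverse ++ l.map (fun x => if x = c then d else x) := by
  intro l
  induction l with
  | nil =>
    intro fuel acc _
    cases fuel <;> simp [PySem.Chars.replace.go]
  | cons x t ih =>
    intro fuel acc hf
    cases fuel with
    | zero => simp at hf
    | succ f =>
      rw [PySem.Chars.replace.go]
      by_cases hx : x = c
      · subst hx
        have hpre : [x].isPrefixOf (x :: t) = true := by simp [List.isPrefixOf]
        rw [if_pos hpre]
        rw [show List.drop [x].length (x :: t) = t from by simp]
        simp only [List.length_cons] at hf
        rw [ih f _ (by omega)]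
        simp
      · have hpre : ¬ ([c].isPrefixOf (x :: t) = true) := by
          simp [List.isPrefixOf]
          exact fun h => absurd h.symm hx
        rw [if_neg hpre]
        simp only [List.length_cons] at hf
        rw [ih f _ (by omega)]
        simp [hx]

lemma pvSetIte {α : Type} (x : List α) (y : Nat) (c : Prop) [Decidable c] (a b : α) :
    (if c then x.set y a else x.set y b) = x.set y (if c then a else b) := by
  split <;> rfl

lemma pvIteSingleton (c : Prop) [Decidable c] (a b : Char) :
    (if c then [a] else [b]) = [if c then a else b] := by
  split <;> rfl

lemma pvJoinSingletons {β : Type} (l : List β) (f : β → Char) :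
    PySem.Chars.join [] (l.map (fun x => [f x])) = l.map f := by
  have h : l.map (fun x => [f x]) = (l.map f).map (fun c => [c]) := by
    simp [List.map_map, Function.comp]
  rw [h, PySem.Chars.join_nil_singletons]

-- single-character str.replace is a map
lemma pvReplace_single (c d : Char) (l : List Char) :
    PySem.Chars.replace l [c] [d] = l.map (fun x => if x = c then d else x) := by
  unfold PySem.Chars.replace
  simp only [List.isEmpty_cons]
  simpa using pvReplaceGo_single c d l l.length [] le_rfl

-- ===== VERDICT (by name: the statement is the Claim_ definition above) =====
theorem solution_spec : Claim_equal_solution := by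
  intro n arr1 arr2 _hdom hpre
  unfold Spec_solution solution solution_alt
  obtain ⟨hlen1, hlen2, hvals⟩ := hpre
  simp only [PySem.List.foldl_append_singleton_eq_map, List.nil_append]
  apply List.map_congr_left
  intro i hi
  rw [PySem.List.mem_pyRange_one] at hi
  obtain ⟨hi0, hin⟩ := hi
  obtain ⟨N, rfl⟩ : ∃ N : Nat, n = (N : Int) := ⟨n.toNat, by omega⟩
  have hN1 : 1 ≤ N := by omega
  obtain ⟨k, hk, rfl⟩ : ∃ k : Nat, k < N ∧ i = (k : Int) :=
    ⟨i.toNat, by omega, by omega⟩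
  -- resolve the row lookups
  simp only [PySem.List.pyGetD_natCast, PySem.List.len_eq]
  simp only [hk, PySem.List.pyRange_zero_natCast, List.map_map, PySem.List.getD_map_range,
    PySem.List.pyGetD_natCast, Function.comp, PySem.List.pyRepeat_singleton,
    List.length_replicate, Int.toNat_natCast, List.foldl_map,
    PySem.List.pySetD_natCast]
  -- per-row integer facts
  simp only [Int.toNat_natCast] at hvals
  obtain ⟨ha0, ha2, hb0, hb2⟩ := hvals k hk
  obtain ⟨aN, haN⟩ : ∃ a : Nat, arr1.getD k 0 = (a : Int) := ⟨(arr1.getD k 0).toNat, by omega⟩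
  obtain ⟨bN, hbN⟩ : ∃ b : Nat, arr2.getD k 0 = (b : Int) := ⟨(arr2.getD k 0).toNat, by omega⟩
  have hpow : ((2 ^ N : Nat) : Int) = (2 : Int) ^ N := by push_cast; ring
  have haN2 : aN < 2 ^ N := by
    rw [haN] at ha2
    omega
  have hbN2 : bN < 2 ^ N := by
    rw [hbN] at hb2
    omega
  rw [haN, hbN, pvToBinChars_natCast aN, pvToBinChars_natCast bN,
    pvZfill_natBin N aN haN2 hN1, pvZfill_natBin N bN hbN2 hN1]
  simp only [pvSetIte]
  rw [pvFoldlSetRange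
    (fun y => if (PySem.Int.ofChars? [(pvBinFull N aN).getD y '0']).getD 0 ≠ 0 ∨
        (PySem.Int.ofChars? [(pvBinFull N bN).getD y '0']).getD 0 ≠ 0 then "#" else " ")
    (List.replicate N "-1") N (by simp)]
  simp only [List.drop_replicate, Nat.sub_self, List.replicate_zero, List.append_nil]
  -- compare as character lists
  apply String.toList_injective
  have t1 : ("1" : String).toList = ['1'] := rfl
  have t0 : ("0" : String).toList = ['0'] := rfl
  have th : ("#" : String).toList = ['#'] := rfl
  have ts : (" " : String).toList = [' '] := rfl
  have te : ("" : String).toList = [] := rfl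
  simp only [PySem.Str.toList_join, PySem.Str.toList_replace, PySem.Str.toList_zfill,
    PySem.Int.toList_toBin, t1, t0, th, ts, te]
  rw [PySem.Int.bor_natCast, pvToBinChars_natCast,
    pvZfill_natBin N (aN ||| bN) (Nat.or_lt_two_pow haN2 hbN2) hN1,
    pvReplace_single '1' '#', pvReplace_single '0' ' ']
  simp only [List.map_map, Function.comp_def, apply_ite String.toList, th, ts,
    pvIteSingleton, pvJoinSingletons]
  simp only [pvBinFull, List.map_map, Function.comp_def]
  apply List.map_congr_left
  intro j hj
  rw [List.mem_range] at hj
  have e1 : (PySem.Int.ofChars? ['1']).getD 0 = (1 : Int) := by decide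
  have e0 : (PySem.Int.ofChars? ['0']).getD 0 = (0 : Int) := by decide
  simp only [PySem.List.getD_map_range, hj]
  by_cases tA : aN.testBit (N - 1 - j) <;> by_cases tB : bN.testBit (N - 1 - j) <;>
    simp [tA, tB, Nat.testBit_or, e1, e0]
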